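-- pv_equiv track=rewrite | github.com/KuiyuanFu/PythonLeetCode | .leetcode/822.card-flipping-game.py | flipgame
-- ===== SOURCE A (Python) =====
-- from typing import List
--
-- def flipgame(fronts: List[int], backs: List[int]) -> int:
--
--     candidates = set()
--     impossibilities = set()
--     for i in range(len(fronts)):
--         f, b = fronts[i], backs[i]
--         if f == b:
--             if f in candidates:
--                 candidates.remove(f)
--             impossibilities.add(f)
--         else:
--             if f not in impossibilities:
--                 candidates.add(f)
--             if b not in impossibilities:
--                 candidates.add(b)
--     return min(candidates) if len(candidates) > 0 else 0
--     pass
-- ===== SOURCE B (Python) =====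
-- def flipgame(fronts, backs):
--     same = {f for f, b in zip(fronts, backs) if f == b}
--     candidates = [x for fb in zip(fronts, backs) for x in fb if x not in same]
--     return min(candidates) if candidates else 0
-- ===== Notes on version B (the rewrite author's own statement) =====
-- stated objective: simpler
-- what changed: Replaces A's interleaved add/remove bookkeeping over two evolving sets with a two-pass precompute: first build the set of values with equal faces, then filter the flattened card values and take the min.
-- outside the precondition, e.g. on flipgame([1, 2], [3]): A raises IndexError, B returns 1
import Mathlib
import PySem

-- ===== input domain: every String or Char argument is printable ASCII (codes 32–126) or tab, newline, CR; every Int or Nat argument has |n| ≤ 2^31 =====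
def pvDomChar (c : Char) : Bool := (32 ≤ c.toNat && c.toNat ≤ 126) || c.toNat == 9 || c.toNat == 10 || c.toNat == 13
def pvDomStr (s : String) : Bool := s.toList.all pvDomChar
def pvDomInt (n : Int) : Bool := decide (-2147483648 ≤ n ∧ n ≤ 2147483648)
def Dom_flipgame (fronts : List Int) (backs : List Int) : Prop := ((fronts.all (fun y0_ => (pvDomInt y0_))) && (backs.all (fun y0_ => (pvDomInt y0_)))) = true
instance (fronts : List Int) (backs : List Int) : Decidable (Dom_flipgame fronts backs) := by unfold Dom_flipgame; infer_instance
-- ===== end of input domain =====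

-- B replaces A's interleaved add/remove set bookkeeping with a two-pass
-- precompute-the-forbidden-set-then-filter structure (objective: simpler).


-- ===== PORT A =====
-- the loop body: one iteration over the pair (f, b) = (fronts[i], backs[i]);
-- state = (candidates, impossibilities); Python's guarded 'if f in candidates: remove' is Set.discard
def flipgameStep (st : PySem.Set Int × PySem.Set Int) (f b : Int) :
    PySem.Set Int × PySem.Set Int :=
  if f == b then
    (PySem.Set.discard st.1 f, PySem.Set.add st.2 f)
  else
    let c1 := if PySem.Set.contains st.2 f then st.1 else PySem.Set.add st.1 f
    let c2 := if PySem.Set.contains st.2 b then c1 else PySem.Set.add c1 b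
    (c2, st.2)

def flipgame (fronts : List Int) (backs : List Int) : Int :=
  -- indexing via pyGetD: exact under Pre_flipgame (every index in range for both lists)
  let st := (PySem.List.pyRange 0 (fronts.length : Int) 1).foldl
    (fun st i => flipgameStep st (PySem.List.pyGetD fronts i 0) (PySem.List.pyGetD backs i 0))
    (PySem.Set.empty, PySem.Set.empty)
  -- min over a set: value independent of iteration order
  match PySem.List.min? st.1 (fun x => x) with
  | some m => m
  | none => 0

-- ===== PORT B =====
def flipgame_alt (fronts : List Int) (backs : List Int) : Int :=
  let same : PySem.Set Int :=
    PySem.Set.ofList (((fronts.zip backs).filter (fun p => p.1 == p.2)).map (fun p => p.1))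
  let candidates :=
    (fronts.zip backs).flatMap (fun p => ([p.1, p.2]).filter (fun x => !(PySem.Set.contains same x)))
  match PySem.List.min? candidates (fun x => x) with
  | some m => m
  | none => 0

-- ===== PRECONDITION & SPEC =====
-- Pre_ excludes exactly the inputs where A raises IndexError (backs shorter than fronts).
def Pre_flipgame (fronts : List Int) (backs : List Int) : Prop := fronts.length ≤ backs.length
instance (fronts : List Int) (backs : List Int) : Decidable (Pre_flipgame fronts backs) := by unfold Pre_flipgame; infer_instance
def pvWitness_flipgame : List Int × List Int := ([1, 2, 4, 4, 7], [1, 3, 4, 1, 3])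

def Spec_flipgame (fronts : List Int) (backs : List Int) (out : Int) : Prop := out = flipgame_alt fronts backs
instance (fronts : List Int) (backs : List Int) (out : Int) : Decidable (Spec_flipgame fronts backs out) := by unfold Spec_flipgame; infer_instance

-- ===== CLAIM (what is proved, stated in full; the proofs are below) =====
def Claim_equal_flipgame : Prop := ∀ (fronts : List Int) (backs : List Int), Dom_flipgame fronts backs → Pre_flipgame fronts backs → Spec_flipgame fronts backs (flipgame fronts backs)

-- ===== LEMMAS AND PROOFS =====

-- fold of A's step over a list of pairs, and the list of equal-face values of a prefix
def flipgameFold (P : List (Int × Int)) : PySem.Set Int × PySem.Set Int :=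
  P.foldl (fun st p => flipgameStep st p.1 p.2) (PySem.Set.empty, PySem.Set.empty)

def sameL (P : List (Int × Int)) : List Int :=
  (P.filter (fun p => p.1 == p.2)).map (fun p => p.1)

lemma sameL_append_singleton (P : List (Int × Int)) (p : Int × Int) :
    sameL (P ++ [p]) = sameL P ++ (if p.1 == p.2 then [p.1] else []) := by
  unfold sameL
  rw [List.filter_append, List.map_append]
  by_cases h : p.1 = p.2 <;> simp [h]

-- invariant of A's loop over a prefix P of the card pairs
lemma flipgameFold_inv (P : List (Int × Int)) :
    (flipgameFold P).2 = PySem.Set.ofList (sameL P) ∧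
    ∀ x : Int, x ∈ (flipgameFold P).1 ↔
      ((∃ p ∈ P, p.1 ≠ p.2 ∧ (x = p.1 ∨ x = p.2)) ∧ x ∉ sameL P) := by
  induction P using List.reverseRecOn with
  | nil => simp [flipgameFold, sameL, PySem.Set.empty]
  | append_singleton P p ih =>
    obtain ⟨ih2, ih1⟩ := ih
    have hmem : ∀ y : Int, PySem.Set.contains (flipgameFold P).2 y = true ↔ y ∈ sameL P := by
      intro y; rw [PySem.Set.contains_iff, ih2, PySem.Set.mem_ofList]
    have hfold : flipgameFold (P ++ [p]) = flipgameStep (flipgameFold P) p.1 p.2 := by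
      unfold flipgameFold; rw [List.foldl_append]; rfl
    rw [hfold, sameL_append_singleton]
    by_cases hp : p.1 = p.2
    · have hpb : (p.1 == p.2) = true := by simp [hp]
      have hs2 : (flipgameStep (flipgameFold P) p.1 p.2).2
          = PySem.Set.add (flipgameFold P).2 p.1 := by simp [flipgameStep, hpb]
      have hs1 : (flipgameStep (flipgameFold P) p.1 p.2).1
          = PySem.Set.discard (flipgameFold P).1 p.1 := by simp [flipgameStep, hpb]
      rw [hpb, if_pos rfl, hs1, hs2]
      constructor
      · rw [ih2, PySem.Set.ofList_append_singleton]
      · intro x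
        rw [PySem.Set.mem_discard, ih1]
        constructor
        · rintro ⟨⟨⟨q, hq, hne, hor⟩, hns⟩, hxp⟩
          refine ⟨⟨q, List.mem_append_left _ hq, hne, hor⟩, ?_⟩
          intro hmem'
          rcases List.mem_append.mp hmem' with h | h
          · exact hns h
          · exact hxp (by simpa using h)
        · rintro ⟨⟨q, hq, hne, hor⟩, hns⟩
          rcases List.mem_append.mp hq with hq | hq
          · exact ⟨⟨⟨q, hq, hne, hor⟩, fun h => hns (List.mem_append_left _ h)⟩,
              fun h => hns (by subst h; exact List.mem_append_right _ (by simp))⟩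
          · simp only [List.mem_singleton] at hq; subst hq; exact absurd hp hne
    · have hpb : (p.1 == p.2) = false := by simp [hp]
      have hm1 := hmem p.1
      have hm2 := hmem p.2
      have hs2 : (flipgameStep (flipgameFold P) p.1 p.2).2 = (flipgameFold P).2 := by
        simp [flipgameStep, hpb]
      have hstep : ∀ x : Int, x ∈ (flipgameStep (flipgameFold P) p.1 p.2).1 ↔
          x ∈ (flipgameFold P).1 ∨ (x = p.1 ∧ p.1 ∉ sameL P) ∨ (x = p.2 ∧ p.2 ∉ sameL P) := by
        intro x
        simp only [flipgameStep, hpb, Bool.false_eq_true, if_false]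
        split_ifs with h1 h2 h2 <;> rw [hm2] at h1 <;> rw [hm1] at h2 <;>
          (try simp only [PySem.Set.mem_add]) <;> tauto
      rw [hpb]
      simp only [Bool.false_eq_true, if_false, List.append_nil]
      refine ⟨by rw [hs2, ih2], ?_⟩
      intro x
      rw [hstep, ih1]
      constructor
      · rintro (⟨⟨q, hq, hne, hor⟩, hns⟩ | ⟨hx, hns⟩ | ⟨hx, hns⟩)
        · exact ⟨⟨q, List.mem_append_left _ hq, hne, hor⟩, hns⟩
        · exact ⟨⟨p, List.mem_append_right _ (by simp), hp, Or.inl hx⟩, hx ▸ hns⟩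
        · exact ⟨⟨p, List.mem_append_right _ (by simp), hp, Or.inr hx⟩, hx ▸ hns⟩
      · rintro ⟨⟨q, hq, hne, hor⟩, hns⟩
        rcases List.mem_append.mp hq with hq | hq
        · exact Or.inl ⟨⟨q, hq, hne, hor⟩, hns⟩
        · simp only [List.mem_singleton] at hq; subst hq
          rcases hor with hx | hx
          · exact Or.inr (Or.inl ⟨hx, hx ▸ hns⟩)
          · exact Or.inr (Or.inr ⟨hx, hx ▸ hns⟩)

-- min over Int lists with the same members is the same (the minimum value is unique)
lemma min?_id_congr (l₁ l₂ : List Int) (h : ∀ x, x ∈ l₁ ↔ x ∈ l₂) :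
    PySem.List.min? l₁ (fun x => x) = PySem.List.min? l₂ (fun x => x) := by
  cases h₁ : PySem.List.min? l₁ (fun x => x) with
  | none =>
    rw [PySem.List.min?_eq_none_iff] at h₁
    subst h₁
    symm; rw [PySem.List.min?_eq_none_iff]
    cases l₂ with
    | nil => rfl
    | cons y t => exact absurd ((h y).mpr (by simp)) (by simp)
  | some m =>
    cases h₂ : PySem.List.min? l₂ (fun x => x) with
    | none =>
      rw [PySem.List.min?_eq_none_iff] at h₂
      subst h₂
      exact absurd ((h m).mp (PySem.List.min?_mem h₁)) (by simp)
    | some m' =>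
      have hm := PySem.List.min?_mem h₁
      have hm' := PySem.List.min?_mem h₂
      have h1 := PySem.List.min?_isMin h₁ m' ((h m').mpr hm')
      have h2 := PySem.List.min?_isMin h₂ m ((h m).mp hm)
      simp only [Option.some.injEq]
      omega

-- membership in B's candidate list
lemma mem_candB (pairs : List (Int × Int)) (x : Int) :
    x ∈ pairs.flatMap (fun p => ([p.1, p.2]).filter
        (fun y => !(PySem.Set.contains (PySem.Set.ofList (sameL pairs)) y))) ↔
      ((∃ p ∈ pairs, x = p.1 ∨ x = p.2) ∧ x ∉ sameL pairs) := by
  have hc : ∀ y : Int,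
      ((!(PySem.Set.contains (PySem.Set.ofList (sameL pairs)) y)) = true) = (y ∉ sameL pairs) := by
    intro y
    rw [Bool.not_eq_eq_eq_not, Bool.not_true, ← Bool.not_eq_true,
      PySem.Set.contains_iff, PySem.Set.mem_ofList]
  simp only [List.mem_flatMap, List.mem_filter, List.mem_cons,
    List.not_mem_nil, or_false, hc]
  constructor
  · rintro ⟨p, hp, hx, hns⟩
    exact ⟨⟨p, hp, hx⟩, hns⟩
  · rintro ⟨⟨p, hp, hx⟩, hns⟩
    exact ⟨p, hp, hx, hns⟩

-- A's loop over indices equals the fold over the zipped pairs (under Pre_)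
lemma flipgame_fold_eq_pairs (fronts backs : List Int) (h : fronts.length ≤ backs.length) :
    (PySem.List.pyRange 0 (fronts.length : Int) 1).foldl
      (fun st i => flipgameStep st (PySem.List.pyGetD fronts i 0) (PySem.List.pyGetD backs i 0))
      (PySem.Set.empty, PySem.Set.empty)
    = flipgameFold (fronts.zip backs) := by
  have hlen : ((fronts.zip backs).length : Int) = (fronts.length : Int) := by
    simp [List.length_zip]; omega
  unfold flipgameFold
  rw [← PySem.List.foldl_pyRange_zero_pyGetD' (fronts.zip backs) (0, 0)
      (fun st p => flipgameStep st p.1 p.2) (PySem.Set.empty, PySem.Set.empty), hlen]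
  apply PySem.List.foldl_congr_mem
  intro acc i hi
  rw [PySem.List.mem_pyRange_one] at hi
  obtain ⟨h0, hlt⟩ := hi
  obtain ⟨k, rfl⟩ : ∃ k : Nat, (k : Int) = i := ⟨i.toNat, by omega⟩
  have hk : k < fronts.length := by exact_mod_cast hlt
  have hkz : k < (fronts.zip backs).length := by rw [List.length_zip]; omega
  have hkb : k < backs.length := by omega
  rw [PySem.List.pyGetD_natCast, PySem.List.pyGetD_natCast, PySem.List.pyGetD_natCast]
  simp [List.getD_eq_getElem?_getD, hk, hkb, List.getElem_zip]

-- ===== VERDICT (by name: the statement is the Claim_ definition above) =====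
theorem flipgame_spec : Claim_equal_flipgame := by
  intro fronts backs _ hpre
  have hinv := (flipgameFold_inv (fronts.zip backs)).2
  have hmin : PySem.List.min? (flipgameFold (fronts.zip backs)).1 (fun x => x) =
      PySem.List.min? ((fronts.zip backs).flatMap (fun p => ([p.1, p.2]).filter
        (fun x => !(PySem.Set.contains (PySem.Set.ofList (sameL (fronts.zip backs))) x))))
        (fun x => x) := by
    apply min?_id_congr
    intro x
    rw [hinv x, mem_candB]
    constructor
    · rintro ⟨⟨p, hp, _, hx⟩, hns⟩; exact ⟨⟨p, hp, hx⟩, hns⟩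
    · rintro ⟨⟨p, hp, hx⟩, hns⟩
      refine ⟨⟨p, hp, ?_, hx⟩, hns⟩
      intro hpe
      apply hns
      unfold sameL
      rw [List.mem_map]
      refine ⟨p, List.mem_filter.mpr ⟨hp, by simp [hpe]⟩, ?_⟩
      rcases hx with hx | hx <;> omega
  simp only [sameL] at hmin
  unfold Spec_flipgame flipgame flipgame_alt
  simp only [flipgame_fold_eq_pairs fronts backs hpre]
  rw [hmin]
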